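-- pv_equiv track=rewrite | github.com/jisuuuu/Algorithm_Study | Programmers/bs_1.py | solution
-- ===== SOURCE A (Python) =====
-- def solution(budgets, M):
--     answer = 0
--     maxs = max(budgets)
--     mins = 0
--
--     while mins <= maxs:
--         mid = int((mins + maxs) / 2)
--
--         temp = [b if b < mid else mid for b in budgets]
--
--         if sum(temp) > M:
--             maxs = mid - 1
--         elif sum(temp) <= M:
--             mins = mid + 1
--             answer = mid
--
--     return answer
-- ===== SOURCE B (Python) =====
-- def solution(budgets, M):
--     # sort once + prefix sums; each candidate cap is costed in O(log n) by
--     # hand-rolled bisect instead of A's O(n) rebuild of the capped list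
--     s = sorted(budgets)
--     n = len(s)
--
--     pre = [0]
--     for b in s:
--         pre.append(pre[-1] + b)
--
--     def cost(cap):
--         lo, hi = 0, n
--         while lo < hi:
--             m = (lo + hi) // 2
--             if s[m] < cap:
--                 lo = m + 1
--             else:
--                 hi = m
--         return pre[lo] + (n - lo) * cap
--
--     answer = 0
--     mins, maxs = 0, s[-1]
--     while mins <= maxs:
--         mid = (mins + maxs) // 2
--         if cost(mid) > M:
--             maxs = mid - 1
--         else:
--             mins = mid + 1
--             answer = mid
--     return answer
-- ===== Notes on version B (the rewrite author's own statement) =====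
-- stated objective: faster
-- what changed: B sorts the budgets once and builds prefix sums, so each candidate cap tried by the binary search on the cap is costed in O(log n) via a bisect on the sorted list instead of A's O(n) rebuild-and-sum of the whole capped list.
import Mathlib
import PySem

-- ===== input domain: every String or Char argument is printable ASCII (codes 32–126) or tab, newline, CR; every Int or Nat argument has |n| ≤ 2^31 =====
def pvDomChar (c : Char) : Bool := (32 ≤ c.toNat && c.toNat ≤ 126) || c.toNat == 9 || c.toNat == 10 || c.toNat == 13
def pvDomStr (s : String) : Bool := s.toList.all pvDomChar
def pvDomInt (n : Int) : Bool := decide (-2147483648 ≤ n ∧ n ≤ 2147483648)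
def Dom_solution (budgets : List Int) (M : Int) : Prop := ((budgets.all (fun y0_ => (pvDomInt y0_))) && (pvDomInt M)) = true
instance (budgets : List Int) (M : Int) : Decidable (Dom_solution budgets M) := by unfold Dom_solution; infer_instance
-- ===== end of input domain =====

-- B sorts once + prefix sums so each cap is costed by a bisect; same return value as A on every nonempty list.

-- ===== PORT A =====
-- (termination helper for both binary-search loops)
lemma tdiv_two_mid_bounds {lo hi : Int} (h : lo ≤ hi) : lo ≤ (lo + hi).tdiv 2 ∧ (lo + hi).tdiv 2 ≤ hi := by
  rw [Int.tdiv_eq_ediv]; simp [Int.sign]; split <;> omega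

-- while mins <= maxs loop; mid = int((mins+maxs)/2) is truncating division (exact here since |mins+maxs| < 2^53);
-- the Python 'elif sum(temp) <= M' branch is the exhaustive complement of 'sum(temp) > M', ported as 'else'.
def loopA (budgets : List Int) (M : Int) (mins maxs answer : Int) : Int :=
  if h : mins ≤ maxs then
    let mid := PySem.Int.truncdiv (mins + maxs) 2
    let temp := budgets.map (fun b => if b < mid then b else mid)
    if temp.sum > M then loopA budgets M mins (mid - 1) answer
    else loopA budgets M (mid + 1) maxs mid
  else answer
termination_by (maxs + 1 - mins).toNat
decreasing_by all_goals (simp only [PySem.Int.truncdiv] at *; have := tdiv_two_mid_bounds h; omega)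

-- max(budgets) raises ValueError on []; Pre_ excludes the empty list, the getD default is never used there.
def solution (budgets : List Int) (M : Int) : Int :=
  let maxs := (PySem.List.max? budgets (fun x => x)).getD 0
  loopA budgets M 0 maxs 0

-- ===== PORT B =====
-- pre = [0]; for b in s: pre.append(pre[-1] + b)
def buildPre (s : List Int) : List Int :=
  s.foldl (fun acc b => acc ++ [PySem.List.pyGetD acc (-1) 0 + b]) [0]

-- hand-written bisect_left loop of Source B (lo, hi stay in [0, n], so plain Nat arithmetic is exact for Python's)
def bisectB (s : List Int) (cap : Int) (lo hi : Nat) : Nat :=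
  if lo < hi then
    let m := (lo + hi) / 2
    if s.getD m 0 < cap then bisectB s cap (m + 1) hi else bisectB s cap lo m
  else lo
termination_by hi - lo
decreasing_by all_goals omega

def costB (s pre : List Int) (cap : Int) : Int :=
  pre.getD (bisectB s cap 0 s.length) 0 + ((s.length : Int) - (bisectB s cap 0 s.length : Int)) * cap

def loopB (s pre : List Int) (M : Int) (mins maxs answer : Int) : Int :=
  if h : mins ≤ maxs then
    let mid := PySem.Int.floordiv (mins + maxs) 2
    if costB s pre mid > M then loopB s pre M mins (mid - 1) answer
    else loopB s pre M (mid + 1) maxs mid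
  else answer
termination_by (maxs + 1 - mins).toNat
decreasing_by all_goals (have := PySem.Int.floordiv_two_mid_bounds h; omega)

-- s[-1] raises IndexError on []; Pre_ excludes the empty list.
def solution_alt (budgets : List Int) (M : Int) : Int :=
  let s := PySem.List.sorted budgets (fun x => x) false
  let pre := buildPre s
  loopB s pre M 0 (PySem.List.pyGetD s (-1) 0) 0

-- ===== PRECONDITION & SPEC =====
-- Pre_ excludes only the empty list, on which both A (max([])) and B (s[-1]) raise.
def Pre_solution (budgets : List Int) (M : Int) : Prop := budgets ≠ []
instance (budgets : List Int) (M : Int) : Decidable (Pre_solution budgets M) := by unfold Pre_solution; infer_instance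
def pvWitness_solution : List Int × Int := ([1, 3, 2, 5], 9)

def Spec_solution (budgets : List Int) (M : Int) (out : Int) : Prop := out = solution_alt budgets M
instance (budgets : List Int) (M : Int) (out : Int) : Decidable (Spec_solution budgets M out) := by unfold Spec_solution; infer_instance

-- ===== CLAIM (what is proved, stated in full; the proofs are below) =====
def Claim_equal_solution : Prop := ∀ (budgets : List Int) (M : Int), Dom_solution budgets M → Pre_solution budgets M → Spec_solution budgets M (solution budgets M)

-- ===== LEMMAS AND PROOFS =====

-- running sums starting from v (proof-side characterisation of buildPre)
def sums (v : Int) : List Int → List Int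
  | [] => []
  | b :: t => (v + b) :: sums (v + b) t

lemma buildPre_aux (s : List Int) : ∀ (acc : List Int) (h : acc ≠ []),
    s.foldl (fun acc b => acc ++ [PySem.List.pyGetD acc (-1) 0 + b]) acc = acc ++ sums (acc.getLast h) s := by
  induction s with
  | nil => intro acc h; simp [sums]
  | cons b t ih =>
    intro acc h
    simp only [List.foldl_cons, PySem.List.pyGetD_neg_one acc 0 h]
    rw [ih (acc ++ [acc.getLast h + b]) (by simp)]
    simp [sums]

lemma buildPre_eq (s : List Int) : buildPre s = 0 :: sums 0 s := by
  unfold buildPre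
  rw [buildPre_aux s [0] (by simp)]
  simp

lemma sums_getD : ∀ (s : List Int) (v : Int) (k : Nat), k ≤ s.length →
    (v :: sums v s).getD k 0 = v + (s.take k).sum := by
  intro s
  induction s with
  | nil =>
    intro v k hk
    have : k = 0 := by simpa using hk
    subst this; simp [sums]
  | cons b t ih =>
    intro v k hk
    cases k with
    | zero => simp
    | succ k =>
      have h1 := ih (v + b) k (by simpa using hk)
      simp only [sums, List.getD] at h1 ⊢
      simp [h1]; ring

lemma pre_getD (s : List Int) (k : Nat) (hk : k ≤ s.length) :
    (buildPre s).getD k 0 = (s.take k).sum := by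
  rw [buildPre_eq, sums_getD s 0 k hk]; ring

-- bisectB returns a boundary index: everything strictly below it is < cap, everything from it on is ≥ cap
lemma bisectB_boundary (s : List Int) (hs : s.Pairwise (· ≤ ·)) (cap : Int) :
    ∀ fuel lo hi, hi - lo ≤ fuel → lo ≤ hi → hi ≤ s.length →
    (∀ j, j < lo → ∀ (hj : j < s.length), s[j] < cap) →
    (∀ j, hi ≤ j → ∀ (hj : j < s.length), cap ≤ s[j]) →
    lo ≤ bisectB s cap lo hi ∧ bisectB s cap lo hi ≤ hi ∧
    (∀ j, ∀ (hj : j < s.length), (j < bisectB s cap lo hi → s[j] < cap) ∧ (bisectB s cap lo hi ≤ j → cap ≤ s[j])) := by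
  intro fuel
  induction fuel with
  | zero =>
    intro lo hi hfuel hlh _ hlt hge
    have hhl : hi = lo := by omega
    rw [bisectB]; simp only [show ¬ lo < hi by omega, if_false]
    exact ⟨le_refl _, by omega, fun j hj => ⟨fun h => hlt j h hj, fun h => hge j (by omega) hj⟩⟩
  | succ fuel ih =>
    intro lo hi hfuel hlh hhn hlt hge
    rw [bisectB]
    by_cases hcond : lo < hi
    · simp only [hcond, if_true]
      have hm : (lo + hi) / 2 < s.length := by omega
      have hmlo : lo ≤ (lo + hi) / 2 := by omega
      have hmhi : (lo + hi) / 2 < hi := by omega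
      have hget : s.getD ((lo + hi) / 2) 0 = s[(lo + hi) / 2] := List.getD_eq_getElem s 0 hm
      have hmono : ∀ p q (hpq : p ≤ q) (hq : q < s.length), s[p]'(by omega) ≤ s[q] := by
        intro p q hpq hq
        rcases eq_or_lt_of_le hpq with rfl | hlt'
        · exact le_refl _
        · exact (List.pairwise_iff_getElem.mp hs) p q (by omega) hq hlt'
      by_cases hc : s.getD ((lo + hi) / 2) 0 < cap
      · simp only [hc, if_true]
        refine (ih ((lo + hi) / 2 + 1) hi (by omega) (by omega) hhn ?_ hge).imp (by omega) (fun h => h)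
        intro j hj hjlen
        by_cases hjlo : j < lo
        · exact hlt j hjlo hjlen
        · have : s[j] ≤ s[(lo + hi) / 2] := hmono j _ (by omega) hm
          rw [hget] at hc; omega
      · simp only [hc, if_false]
        refine (ih lo ((lo + hi) / 2) (by omega) (by omega) (by omega) hlt ?_).imp (fun h => h) (fun h => ⟨by omega, h.2⟩)
        intro j hj hjlen
        have : s[(lo + hi) / 2] ≤ s[j] := hmono _ j hj hjlen
        rw [hget] at hc; omega
    · simp only [hcond, if_false]
      exact ⟨le_refl _, by omega, fun j hj => ⟨fun h => hlt j h hj, fun h => hge j (by omega) hj⟩⟩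

-- the capped sum splits at any boundary index
lemma sum_min_eq (cap : Int) : ∀ (s : List Int) (k : Nat), k ≤ s.length →
    (∀ j, ∀ (hj : j < s.length), (j < k → s[j] < cap) ∧ (k ≤ j → cap ≤ s[j])) →
    (s.map (fun b => if b < cap then b else cap)).sum = (s.take k).sum + ((s.length : Int) - (k : Int)) * cap := by
  intro s
  induction s with
  | nil =>
    intro k hk _
    have : k = 0 := by simpa using hk
    subst this; simp
  | cons b t ih =>
    intro k hk hb
    cases k with
    | zero =>
      have h0 := (hb 0 (by simp)).2 (by omega)
      simp only [List.getElem_cons_zero] at h0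
      have hbge : ¬ b < cap := by omega
      have hrec := ih 0 (by omega) (fun j hj => ⟨by omega, fun _ => by
        have := (hb (j+1) (by simp; omega)).2 (by omega); simpa using this⟩)
      simp only [List.map_cons, List.sum_cons, hbge, if_false, List.take_zero, List.sum_nil, List.length_cons, hrec]
      push_cast; ring
    | succ k =>
      have h0 := (hb 0 (by simp)).1 (by omega)
      simp only [List.getElem_cons_zero] at h0
      have hrec := ih k (by simpa using hk)
        (fun j hj => ⟨fun h => by
            have := (hb (j+1) (by simp; omega)).1 (by omega); simpa using this,
          fun h => by
            have := (hb (j+1) (by simp; omega)).2 (by omega); simpa using this⟩)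
      simp only [List.map_cons, List.sum_cons, h0, if_true, List.take_succ_cons, List.sum_cons, List.length_cons, hrec]
      push_cast; ring

-- B's bisect+prefix cost equals A's capped sum
lemma cost_eq (budgets : List Int) (cap : Int) :
    costB (PySem.List.sorted budgets (fun x => x) false) (buildPre (PySem.List.sorted budgets (fun x => x) false)) cap
      = (budgets.map (fun b => if b < cap then b else cap)).sum := by
  set s := PySem.List.sorted budgets (fun x => x) false with hsdef
  have hs : s.Pairwise (· ≤ ·) := PySem.List.sorted_pairwise budgets (fun x => x)
  have hperm : (s.map (fun b => if b < cap then b else cap)).Perm (budgets.map (fun b => if b < cap then b else cap)) :=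
    (PySem.List.sorted_perm budgets (fun x => x) false).map _
  rw [← hperm.sum_eq]
  obtain ⟨h1, h2, h3⟩ := bisectB_boundary s hs cap s.length 0 s.length (by omega) (by omega) (le_refl _)
    (by omega) (fun j hj hjl => by omega)
  unfold costB
  rw [pre_getD s _ h2, sum_min_eq cap s _ h2 h3]

-- the two binary-search loops agree step by step (mins stays nonnegative, so trunc- and floor-division agree)
lemma loop_eq (budgets : List Int) (M : Int) :
    ∀ fuel (mins maxs answer : Int), (maxs + 1 - mins).toNat ≤ fuel → 0 ≤ mins →
    loopA budgets M mins maxs answer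
      = loopB (PySem.List.sorted budgets (fun x => x) false) (buildPre (PySem.List.sorted budgets (fun x => x) false)) M mins maxs answer := by
  intro fuel
  induction fuel with
  | zero =>
    intro mins maxs answer hfuel hm
    have : ¬ mins ≤ maxs := by omega
    rw [loopA, loopB]; simp [this]
  | succ fuel ih =>
    intro mins maxs answer hfuel hm
    rw [loopA, loopB]
    by_cases hc : mins ≤ maxs
    · simp only [hc]
      have hmid : PySem.Int.truncdiv (mins + maxs) 2 = PySem.Int.floordiv (mins + maxs) 2 := by
        rw [PySem.Int.floordiv_eq_ediv_of_pos (by omega : (0:Int) < 2)]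
        simp only [PySem.Int.truncdiv]
        have hnn : 0 ≤ mins + maxs := by omega
        rw [Int.tdiv_eq_ediv]; simp [Int.sign]; omega
      have hb := PySem.Int.floordiv_two_mid_bounds (hc : mins ≤ maxs)
      rw [hmid, cost_eq budgets (PySem.Int.floordiv (mins + maxs) 2)]
      by_cases hsum : (budgets.map (fun b => if b < PySem.Int.floordiv (mins + maxs) 2 then b else PySem.Int.floordiv (mins + maxs) 2)).sum > M
      · simp only [hsum, if_true]
        exact ih mins _ answer (by omega) hm
      · simp only [hsum, if_false]
        exact ih _ maxs _ (by omega) (by omega)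
    · simp [hc]

-- max(budgets) = last element of the sorted list
lemma max_eq_sorted_last (budgets : List Int) (hne : budgets ≠ []) :
    (PySem.List.max? budgets (fun x => x)).getD 0
      = PySem.List.pyGetD (PySem.List.sorted budgets (fun x => x) false) (-1) 0 := by
  set s := PySem.List.sorted budgets (fun x => x) false with hsdef
  have hsne : s ≠ [] := by
    intro h; exact hne ((PySem.List.sorted_eq_nil_iff budgets (fun x => x) false).mp h)
  rw [PySem.List.pyGetD_neg_one s 0 hsne]
  obtain ⟨m, hm⟩ : ∃ m, PySem.List.max? budgets (fun x => x) = some m := by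
    cases h : PySem.List.max? budgets (fun x => x) with
    | none => exact absurd ((PySem.List.max?_eq_none_iff budgets (fun x => x)).mp h) hne
    | some m => exact ⟨m, rfl⟩
  rw [hm]; simp only [Option.getD_some]
  have hperm := PySem.List.sorted_perm budgets (fun x => x) false
  have hlast_mem : s.getLast hsne ∈ budgets := hperm.mem_iff.mp (List.getLast_mem hsne)
  have h1 : s.getLast hsne ≤ m := PySem.List.max?_isMax hm _ hlast_mem
  have hmmem : m ∈ s := hperm.mem_iff.mpr (PySem.List.max?_mem hm)
  obtain ⟨p, hp, hpe⟩ := List.mem_iff_getElem.mp hmmem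
  have hlast : s.getLast hsne = s[s.length - 1]'(by
      have : 0 < s.length := List.length_pos_iff.mpr hsne; omega) := List.getLast_eq_getElem hsne
  have h2 : m ≤ s.getLast hsne := by
    rw [hlast, ← hpe]
    exact PySem.List.sorted_id_getElem_mono budgets (by omega) (by
      have : 0 < s.length := List.length_pos_iff.mpr hsne
      simpa [hsdef] using this)
  omega

-- ===== VERDICT (by name: the statement is the Claim_ definition above) =====
theorem solution_spec : Claim_equal_solution := by
  intro budgets M _ hpre
  unfold Spec_solution solution solution_alt
  rw [max_eq_sorted_last budgets hpre]
  exact loop_eq budgets M _ 0 _ 0 (le_refl _) (by omega)
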